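-- pv_equiv track=rewrite | github.com/drinkyouroj/ghosteditor | backend/tests/eval/test_bible_ground_truth.py | _thread_match
-- ===== SOURCE A (Python) =====
-- def _thread_match(gt_thread: str, generated_threads: list[str]) -> bool:
--     """Check if a ground truth plot thread has a fuzzy keyword match in generated threads.
--
--     Extracts key words from the ground truth thread and checks if any generated
--     thread contains at least 2 of them.
--     """
--     # Extract meaningful keywords (skip short common words)
--     stopwords = {
--         "the", "and", "for", "that", "this", "with", "from", "are", "was",
--         "his", "her", "its", "who", "how", "has", "had", "been", "will",
--         "she", "they", "them", "their", "into", "about", "than",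
--     }
--     gt_words = [
--         w.lower().strip(".,;:!?—-\"'()")
--         for w in gt_thread.split()
--         if len(w) > 2
--     ]
--     keywords = [w for w in gt_words if w not in stopwords]
--
--     for gen_thread in generated_threads:
--         gen_lower = gen_thread.lower()
--         matches = sum(1 for kw in keywords if kw in gen_lower)
--         if matches >= 2 or (len(keywords) <= 2 and matches >= 1):
--             return True
--     return False
-- ===== SOURCE B (Python) =====
-- def _thread_match(gt_thread: str, generated_threads: list[str]) -> bool:
--     stop = set(
--         "the and for that this with from are was his her its who how has had "
--         "been will she they them their into about than".split()
--     )
--     keywords = []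
--     for w in gt_thread.split():
--         if len(w) > 2:
--             k = w.lower().strip(".,;:!?\u2014-\"'()")
--             if k not in stop:
--                 keywords.append(k)
--     need = 1 if len(keywords) <= 2 else 2
--     # parallel per-thread match counters, keyword-outer traversal
--     pairs = [[t.lower(), 0] for t in generated_threads]
--     for kw in keywords:
--         for p in pairs:
--             if kw in p[0]:
--                 p[1] += 1
--                 if p[1] >= need:
--                     return True
--     return False
-- ===== Notes on version B (the rewrite author's own statement) =====
-- stated objective: alternative
-- what changed: B inverts the loop nesting: it keeps a vector of per-thread match counters, iterates keyword-outer over pre-lowercased threads, and returns True the moment any counter reaches the once-computed threshold (1 if at most 2 keywords else 2), instead of A's thread-outer full count-then-test.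
import Mathlib
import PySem

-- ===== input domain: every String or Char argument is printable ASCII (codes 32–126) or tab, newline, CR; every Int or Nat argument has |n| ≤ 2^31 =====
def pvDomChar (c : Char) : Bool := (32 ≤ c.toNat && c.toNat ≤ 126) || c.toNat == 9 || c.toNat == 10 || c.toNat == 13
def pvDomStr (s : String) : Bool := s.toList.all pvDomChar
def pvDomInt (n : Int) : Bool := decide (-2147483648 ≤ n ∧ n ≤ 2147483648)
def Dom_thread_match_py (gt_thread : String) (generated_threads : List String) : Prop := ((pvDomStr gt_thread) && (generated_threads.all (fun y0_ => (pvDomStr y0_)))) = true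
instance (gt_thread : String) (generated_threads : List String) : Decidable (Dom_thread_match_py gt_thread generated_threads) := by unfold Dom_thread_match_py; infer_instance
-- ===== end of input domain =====

-- B inverts the loop nesting (keyword-outer with a per-thread counter vector and a precomputed threshold) versus A's thread-outer count-then-test; objective: alternative (same cost).

-- ===== PORT A =====
-- A's stopword set literal
def pvStopA : PySem.Set String := PySem.Set.ofList
  ["the", "and", "for", "that", "this", "with", "from", "are", "was",
   "his", "her", "its", "who", "how", "has", "had", "been", "will",
   "she", "they", "them", "their", "into", "about", "than"]

-- A's thread-outer loop: count matching keywords in each thread, test, early return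
def pvALoop (keywords : List String) : List String → Bool
  | [] => false
  | gen_thread :: rest =>
      let gen_lower := PySem.Str.lower gen_thread
      let matchCount : Int :=
        ((keywords.map (fun kw => if PySem.Str.isIn kw gen_lower then (1 : Int) else 0)).sum)
      if matchCount ≥ 2 ∨ (keywords.length ≤ 2 ∧ matchCount ≥ 1) then true
      else pvALoop keywords rest

def thread_match_py (gt_thread : String) (generated_threads : List String) : Bool :=
  let gt_words :=
    ((PySem.Str.split₀ gt_thread).filter (fun w => 2 < PySem.Str.len w)).map
      (fun w => PySem.Str.stripChars (PySem.Str.lower w) ".,;:!?—-\"'()")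
  let keywords := gt_words.filter (fun w => !(PySem.Set.contains pvStopA w))
  pvALoop keywords generated_threads

-- ===== PORT B =====
-- B's stopword set, built from a split string
def pvStopB : PySem.Set String := PySem.Set.ofList (PySem.Str.split₀
  "the and for that this with from are was his her its who how has had been will she they them their into about than")

-- B inner loop: one keyword against every (lowered thread, counter) pair; none = early True
def pvBInner (need : Nat) (kw : String) : List (String × Nat) → Option (List (String × Nat))
  | [] => some []
  | (g, c) :: rest =>
      if PySem.Str.isIn kw g then
        if need ≤ c + 1 then none
        else (pvBInner need kw rest).map (fun ps => (g, c + 1) :: ps)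
      else (pvBInner need kw rest).map (fun ps => (g, c) :: ps)

-- B outer loop over keywords, threading the counter vector
def pvBOuter (need : Nat) : List String → List (String × Nat) → Bool
  | [], _ => false
  | kw :: kws, pairs =>
      match pvBInner need kw pairs with
      | none => true
      | some pairs' => pvBOuter need kws pairs'

def thread_match_py_alt (gt_thread : String) (generated_threads : List String) : Bool :=
  let keywords := (PySem.Str.split₀ gt_thread).foldl
    (fun acc w =>
      if 2 < PySem.Str.len w then
        let k := PySem.Str.stripChars (PySem.Str.lower w) ".,;:!?—-\"'()"
        if PySem.Set.contains pvStopB k then acc else acc ++ [k]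
      else acc) []
  let need : Nat := if keywords.length ≤ 2 then 1 else 2
  let pairs := generated_threads.map (fun t => (PySem.Str.lower t, (0 : Nat)))
  pvBOuter need keywords pairs

-- ===== PRECONDITION & SPEC =====
def Spec_thread_match_py (gt_thread : String) (generated_threads : List String) (out : Bool) : Prop := out = thread_match_py_alt gt_thread generated_threads
instance (gt_thread : String) (generated_threads : List String) (out : Bool) : Decidable (Spec_thread_match_py gt_thread generated_threads out) := by unfold Spec_thread_match_py; infer_instance

-- ===== CLAIM (what is proved, stated in full; the proofs are below) =====
def Claim_equal_thread_match_py : Prop := ∀ (gt_thread : String) (generated_threads : List String), Dom_thread_match_py gt_thread generated_threads → Spec_thread_match_py gt_thread generated_threads (thread_match_py gt_thread generated_threads)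

-- ===== LEMMAS AND PROOFS =====

-- the two stopword sets coincide
theorem pvStop_eq : pvStopB = pvStopA := by decide

-- B's keyword fold builds A's filter-map-filter keyword list
theorem pvKw_fold (p : String → Prop) [DecidablePred p] (f : String → String) (q : String → Bool) :
    ∀ (ws : List String) (acc : List String),
    ws.foldl (fun acc w =>
      if p w then
        (if q (f w) then acc else acc ++ [f w])
      else acc) acc
    = acc ++ (((ws.filter (fun w => decide (p w))).map f).filter (fun w => !(q w))) := by
  intro ws
  induction ws with
  | nil => intro acc; simp
  | cons w ws ih =>
      intro acc
      by_cases h1 : p w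
      · by_cases h2 : q (f w) = true
        · simp [List.foldl_cons, h1, h2, ih]
        · simp only [Bool.not_eq_true] at h2
          simp [List.foldl_cons, h1, h2, ih]
      · simp [List.foldl_cons, h1, ih]

-- the number of keywords contained in a lowered thread
def pvMatches (keywords : List String) (g : String) : Nat :=
  keywords.countP (fun kw => PySem.Str.isIn kw g)

def pvNeed (keywords : List String) : Nat := if keywords.length ≤ 2 then 1 else 2

-- A's loop is an any-test against the threshold
theorem pvALoop_spec (keywords : List String) :
    ∀ threads : List String,
    pvALoop keywords threads
      = threads.any (fun g => pvNeed keywords ≤ pvMatches keywords (PySem.Str.lower g)) := by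
  intro threads
  induction threads with
  | nil => rfl
  | cons g rest ih =>
      show (if _ ∨ _ then true else pvALoop keywords rest) = _
      have hsum : ((keywords.map (fun kw => if PySem.Str.isIn kw (PySem.Str.lower g) then (1 : Int) else 0)).sum)
          = (pvMatches keywords (PySem.Str.lower g) : Int) := by
        simpa [pvMatches] using
          PySem.List.sum_map_ite_one_zero (fun kw => PySem.Str.isIn kw (PySem.Str.lower g)) keywords
      rw [hsum]
      have hiff : ((pvMatches keywords (PySem.Str.lower g) : Int) ≥ 2
            ∨ (keywords.length ≤ 2 ∧ (pvMatches keywords (PySem.Str.lower g) : Int) ≥ 1))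
          ↔ pvNeed keywords ≤ pvMatches keywords (PySem.Str.lower g) := by
        simp only [pvNeed]; split_ifs <;> omega
      rw [List.any_cons, ih]
      split_ifs with hc
      · simp [hiff.mp hc]
      · have hn := (not_iff_not.mpr hiff).mp hc
        simp [hn]

theorem pvBInner_none (need : Nat) (kw : String) :
    ∀ pairs : List (String × Nat),
    pvBInner need kw pairs = none ↔ ∃ p ∈ pairs, PySem.Str.isIn kw p.1 = true ∧ need ≤ p.2 + 1 := by
  intro pairs
  induction pairs with
  | nil => simp [pvBInner]
  | cons p rest ih =>
      obtain ⟨g, c⟩ := p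
      by_cases h1 : PySem.Chars.isIn kw.toList g.toList = true
      · by_cases h2 : need ≤ c + 1
        · simp [pvBInner, h1, h2]
        · simp [pvBInner, h1, h2, ih]
      · simp [pvBInner, h1, ih]

theorem pvBInner_some (need : Nat) (kw : String) :
    ∀ pairs : List (String × Nat),
    (∀ p ∈ pairs, PySem.Str.isIn kw p.1 = true → p.2 + 1 < need) →
    pvBInner need kw pairs
      = some (pairs.map (fun p => (p.1, if PySem.Str.isIn kw p.1 then p.2 + 1 else p.2))) := by
  intro pairs
  induction pairs with
  | nil => intro _; rfl
  | cons p rest ih =>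
      intro h
      obtain ⟨g, c⟩ := p
      have hr := ih (fun q hq => h q (List.mem_cons_of_mem _ hq))
      by_cases h1 : PySem.Chars.isIn kw.toList g.toList = true
      · have h1' : PySem.Str.isIn kw g = true := by simpa using h1
        have h2 : ¬ need ≤ c + 1 := by
          have := h (g, c) (List.mem_cons_self) h1'; omega
        simp [pvBInner, h1, h2, hr]
      · simp [pvBInner, h1, hr]

theorem pvBOuter_spec (need : Nat) :
    ∀ (kws : List String) (pairs : List (String × Nat)),
    (∀ p ∈ pairs, p.2 < need) →
    (pvBOuter need kws pairs = true ↔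
      ∃ p ∈ pairs, need ≤ p.2 + pvMatches kws p.1) := by
  intro kws
  induction kws with
  | nil =>
      intro pairs hlt
      simp only [pvBOuter, pvMatches, List.countP_nil]
      constructor
      · intro h; cases h
      · rintro ⟨p, hp, hle⟩
        have := hlt p hp; omega
  | cons kw kws ih =>
      intro pairs hlt
      have hcons : ∀ p : String × Nat,
          pvMatches (kw :: kws) p.1
            = pvMatches kws p.1 + (if PySem.Str.isIn kw p.1 = true then 1 else 0) := by
        intro p; simp [pvMatches, List.countP_cons]
      by_cases htrig : ∃ p ∈ pairs, PySem.Str.isIn kw p.1 = true ∧ need ≤ p.2 + 1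
      · have hnone := (pvBInner_none need kw pairs).mpr htrig
        have hstep : pvBOuter need (kw :: kws) pairs = true := by
          simp [pvBOuter, hnone]
        rw [hstep]
        constructor
        · intro _
          obtain ⟨p, hp, hin, hle⟩ := htrig
          refine ⟨p, hp, ?_⟩
          rw [hcons p, if_pos hin]
          omega
        · intro _; rfl
      · push Not at htrig
        have hsafe : ∀ p ∈ pairs, PySem.Str.isIn kw p.1 = true → p.2 + 1 < need := by
          intro p hp hin
          have := htrig p hp hin
          omega
        have hsome := pvBInner_some need kw pairs hsafe
        have hstep : pvBOuter need (kw :: kws) pairs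
            = pvBOuter need kws
                (pairs.map (fun p => (p.1, if PySem.Str.isIn kw p.1 then p.2 + 1 else p.2))) := by
          simp [pvBOuter, hsome]
        have hlt' : ∀ q ∈ pairs.map (fun p => (p.1, if PySem.Str.isIn kw p.1 then p.2 + 1 else p.2)),
            q.2 < need := by
          intro q hq
          obtain ⟨p, hp, rfl⟩ := List.mem_map.mp hq
          show (if PySem.Str.isIn kw p.1 then p.2 + 1 else p.2) < need
          by_cases hin : PySem.Str.isIn kw p.1 = true
          · rw [if_pos hin]; exact hsafe p hp hin
          · rw [if_neg hin]; exact hlt p hp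
        rw [hstep, ih _ hlt']
        constructor
        · rintro ⟨q, hq, hle⟩
          obtain ⟨p, hp, rfl⟩ := List.mem_map.mp hq
          refine ⟨p, hp, ?_⟩
          change need ≤ (if PySem.Str.isIn kw p.1 then p.2 + 1 else p.2) + pvMatches kws p.1 at hle
          rw [hcons p]
          by_cases hin : PySem.Str.isIn kw p.1 = true
          · rw [if_pos hin] at hle; rw [if_pos hin]; omega
          · rw [if_neg hin] at hle; rw [if_neg hin]; omega
        · rintro ⟨p, hp, hle⟩
          rw [hcons p] at hle
          refine ⟨(p.1, if PySem.Str.isIn kw p.1 then p.2 + 1 else p.2), List.mem_map_of_mem hp, ?_⟩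
          show need ≤ (if PySem.Str.isIn kw p.1 then p.2 + 1 else p.2) + pvMatches kws p.1
          by_cases hin : PySem.Str.isIn kw p.1 = true
          · rw [if_pos hin] at hle ⊢; omega
          · rw [if_neg hin] at hle ⊢; omega

-- A's loop and B's loops agree for any keyword list and thread list
theorem pvMain (keywords : List String) (threads : List String) :
    pvALoop keywords threads
      = pvBOuter (if keywords.length ≤ 2 then 1 else 2) keywords
          (threads.map (fun t => (PySem.Str.lower t, (0 : Nat)))) := by
  have hneed : (if keywords.length ≤ 2 then (1 : Nat) else 2) = pvNeed keywords := rfl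
  have hpos : ∀ p ∈ threads.map (fun t => (PySem.Str.lower t, (0 : Nat))), p.2 < pvNeed keywords := by
    intro p hp
    obtain ⟨t, _, rfl⟩ := List.mem_map.mp hp
    show 0 < pvNeed keywords
    unfold pvNeed; split <;> omega
  rw [hneed, pvALoop_spec, Bool.eq_iff_iff, List.any_eq_true,
      pvBOuter_spec (pvNeed keywords) keywords _ hpos]
  constructor
  · rintro ⟨g, hg, hle⟩
    refine ⟨(PySem.Str.lower g, 0), List.mem_map_of_mem hg, ?_⟩
    simpa using hle
  · rintro ⟨p, hp, hle⟩
    obtain ⟨t, ht, rfl⟩ := List.mem_map.mp hp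
    exact ⟨t, ht, by simpa using hle⟩

-- ===== VERDICT (by name: the statement is the Claim_ definition above) =====
theorem thread_match_py_spec : Claim_equal_thread_match_py := by
  intro gt_thread generated_threads _
  unfold Spec_thread_match_py thread_match_py thread_match_py_alt
  rw [pvStop_eq, pvKw_fold]
  simp only [List.nil_append]
  exact pvMain _ _
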